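-- pv_equiv track=rewrite | github.com/zidarsk8/aoc2020 | aoc17.py | get_bounding2
-- ===== SOURCE A (Python) =====
-- def get_bounding2(grid):
--     max_x = max(x for x, y, z, w in grid.keys())
--     max_y = max(y for x, y, z, w in grid.keys())
--     max_z = max(z for x, y, z, w in grid.keys())
--     max_w = max(w for x, y, z, w in grid.keys())
--     min_x = min(x for x, y, z, w in grid.keys())
--     min_y = min(y for x, y, z, w in grid.keys())
--     min_z = min(z for x, y, z, w in grid.keys())
--     min_w = min(w for x, y, z, w in grid.keys())
--     return min_x, max_x, min_y, max_y, min_z, max_z, min_w, max_w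
-- ===== SOURCE B (Python) =====
-- def get_bounding2(grid):
--     it = iter(grid.keys())
--     try:
--         x, y, z, w = next(it)
--     except StopIteration:
--         raise ValueError("empty grid")
--     min_x = max_x = x
--     min_y = max_y = y
--     min_z = max_z = z
--     min_w = max_w = w
--     for x, y, z, w in it:
--         min_x = min(min_x, x)
--         max_x = max(max_x, x)
--         min_y = min(min_y, y)
--         max_y = max(max_y, y)
--         min_z = min(min_z, z)
--         max_z = max(max_z, z)
--         min_w = min(min_w, w)
--         max_w = max(max_w, w)
--     return min_x, max_x, min_y, max_y, min_z, max_z, min_w, max_w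
-- ===== Notes on version B (the rewrite author's own statement) =====
-- stated objective: simpler
-- what changed: One single pass over the keys maintaining all eight extrema at once, instead of eight separate generator passes with max()/min(); still raises ValueError on an empty grid.
import Mathlib
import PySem

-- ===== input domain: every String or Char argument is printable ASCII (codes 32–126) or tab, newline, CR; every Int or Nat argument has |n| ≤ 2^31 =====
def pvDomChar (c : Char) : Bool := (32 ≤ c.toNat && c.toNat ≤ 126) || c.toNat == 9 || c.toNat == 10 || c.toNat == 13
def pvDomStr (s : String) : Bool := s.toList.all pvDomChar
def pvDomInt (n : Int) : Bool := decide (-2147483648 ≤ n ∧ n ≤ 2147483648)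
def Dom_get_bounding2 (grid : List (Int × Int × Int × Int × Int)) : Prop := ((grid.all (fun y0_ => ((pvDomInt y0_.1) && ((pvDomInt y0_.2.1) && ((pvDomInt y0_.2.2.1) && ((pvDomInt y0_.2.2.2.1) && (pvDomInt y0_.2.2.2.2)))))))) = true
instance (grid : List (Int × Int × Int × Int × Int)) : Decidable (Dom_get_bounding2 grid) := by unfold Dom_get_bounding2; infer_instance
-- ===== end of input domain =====

-- ===== PORT A =====
-- A: eight separate max()/min() generator passes over grid.keys(); '.getD 0' is unreachable under Pre_ (grid nonempty).
def get_bounding2 (grid : List (Int × Int × Int × Int × Int)) : Int × Int × Int × Int × Int × Int × Int × Int :=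
  let max_x := (PySem.List.max? (grid.map (fun p => p.1)) (fun v => v)).getD 0
  let max_y := (PySem.List.max? (grid.map (fun p => p.2.1)) (fun v => v)).getD 0
  let max_z := (PySem.List.max? (grid.map (fun p => p.2.2.1)) (fun v => v)).getD 0
  let max_w := (PySem.List.max? (grid.map (fun p => p.2.2.2.1)) (fun v => v)).getD 0
  let min_x := (PySem.List.min? (grid.map (fun p => p.1)) (fun v => v)).getD 0
  let min_y := (PySem.List.min? (grid.map (fun p => p.2.1)) (fun v => v)).getD 0
  let min_z := (PySem.List.min? (grid.map (fun p => p.2.2.1)) (fun v => v)).getD 0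
  let min_w := (PySem.List.min? (grid.map (fun p => p.2.2.2.1)) (fun v => v)).getD 0
  (min_x, max_x, min_y, max_y, min_z, max_z, min_w, max_w)

-- ===== PORT B =====
-- B: one pass; the loop body of Source B.
def bstep (acc : Int × Int × Int × Int × Int × Int × Int × Int) (p : Int × Int × Int × Int × Int) :
    Int × Int × Int × Int × Int × Int × Int × Int :=
  (min acc.1 p.1, max acc.2.1 p.1,
   min acc.2.2.1 p.2.1, max acc.2.2.2.1 p.2.1,
   min acc.2.2.2.2.1 p.2.2.1, max acc.2.2.2.2.2.1 p.2.2.1,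
   min acc.2.2.2.2.2.2.1 p.2.2.2.1, max acc.2.2.2.2.2.2.2 p.2.2.2.1)

-- default on [] is unreachable under Pre_ (Source B raises ValueError there, like A)
def get_bounding2_alt (grid : List (Int × Int × Int × Int × Int)) : Int × Int × Int × Int × Int × Int × Int × Int :=
  match grid with
  | [] => (0, 0, 0, 0, 0, 0, 0, 0)
  | p :: rest => rest.foldl bstep (p.1, p.1, p.2.1, p.2.1, p.2.2.1, p.2.2.1, p.2.2.2.1, p.2.2.2.1)

-- ===== PRECONDITION & SPEC =====
-- Pre_ excludes only the empty grid, on which A's max() raises ValueError (B raises ValueError there too).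
def Pre_get_bounding2 (grid : List (Int × Int × Int × Int × Int)) : Prop := grid ≠ []
instance (grid : List (Int × Int × Int × Int × Int)) : Decidable (Pre_get_bounding2 grid) := by unfold Pre_get_bounding2; infer_instance
def pvWitness_get_bounding2 : (List (Int × Int × Int × Int × Int)) := [(1, 2, 3, 4, 5)]
def Spec_get_bounding2 (grid : List (Int × Int × Int × Int × Int)) (out : Int × Int × Int × Int × Int × Int × Int × Int) : Prop := out = get_bounding2_alt grid
instance (grid : List (Int × Int × Int × Int × Int)) (out : Int × Int × Int × Int × Int × Int × Int × Int) : Decidable (Spec_get_bounding2 grid out) := by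
  unfold Spec_get_bounding2
  have i2 : DecidableEq (Int × Int) := instDecidableEqProd
  have i3 : DecidableEq (Int × Int × Int) := @instDecidableEqProd _ _ _ i2
  have i4 : DecidableEq (Int × Int × Int × Int) := @instDecidableEqProd _ _ _ i3
  have i5 : DecidableEq (Int × Int × Int × Int × Int) := @instDecidableEqProd _ _ _ i4
  have i6 : DecidableEq (Int × Int × Int × Int × Int × Int) := @instDecidableEqProd _ _ _ i5
  have i7 : DecidableEq (Int × Int × Int × Int × Int × Int × Int) := @instDecidableEqProd _ _ _ i6
  have i8 : DecidableEq (Int × Int × Int × Int × Int × Int × Int × Int) := @instDecidableEqProd _ _ _ i7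
  exact i8 out (get_bounding2_alt grid)

-- ===== CLAIM =====
def Claim_equal_get_bounding2 : Prop := ∀ (grid : List (Int × Int × Int × Int × Int)), Dom_get_bounding2 grid → Pre_get_bounding2 grid → Spec_get_bounding2 grid (get_bounding2 grid)

-- ===== LEMMAS AND PROOFS =====
theorem bfold_split (rest : List (Int × Int × Int × Int × Int))
    (a b c d e f g h : Int) :
    rest.foldl bstep (a, b, c, d, e, f, g, h) =
      (rest.foldl (fun acc q => min acc q.1) a,
       rest.foldl (fun acc q => max acc q.1) b,
       rest.foldl (fun acc q => min acc q.2.1) c,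
       rest.foldl (fun acc q => max acc q.2.1) d,
       rest.foldl (fun acc q => min acc q.2.2.1) e,
       rest.foldl (fun acc q => max acc q.2.2.1) f,
       rest.foldl (fun acc q => min acc q.2.2.2.1) g,
       rest.foldl (fun acc q => max acc q.2.2.2.1) h) := by
  induction rest generalizing a b c d e f g h with
  | nil => rfl
  | cons q t ih => simp [List.foldl_cons, bstep, ih]

theorem get_bounding2_spec : Claim_equal_get_bounding2 := by
  intro grid _ hpre
  unfold Spec_get_bounding2
  match grid with
  | [] => exact absurd rfl hpre
  | p :: rest =>
    simp only [get_bounding2, get_bounding2_alt, List.map_cons,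
      PySem.List.max?_id_cons, PySem.List.min?_id_cons, Option.getD_some,
      bfold_split, List.foldl_map]
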